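-- pv_equiv track=rewrite | github.com/Jaryan-Kang/UC_BERKELEY_COURSE | cs61a/cats/cats.py | feline_fixes
-- ===== SOURCE A (Python) =====
-- def feline_fixes(typed, source, limit):
--     """A diff function for autocorrect that determines how many letters
--     in TYPED need to be substituted to create SOURCE, then adds the difference in
--     their lengths and returns the result.
--
--     Arguments:
--         typed: a starting word
--         source: a string representing a desired goal word
--         limit: a number representing an upper bound on the number of chars that must change
--
--     """
--     # Base case: If one of the strings is empty, return the absolute difference in lengths
--     if typed == '' or source == '':
--         return abs(len(typed) - len(source))
--
--     # Base case: If limit is reached, return a value greater than the limit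
--     if limit < 0:
--         return limit + 1
--
--     # Base case: If both characters are the same, proceed to the next character
--     if typed[0] == source[0]:
--         return feline_fixes(typed[1:], source[1:], limit)
--
--     # If characters are different and limit allows further operations, recursively explore options
--     diff_substitute = 1 + feline_fixes(typed[1:], source[1:], limit - 1)
--
--     # Return the minimum difference
--     min_diff = diff_substitute
--
--     # If the minimum difference exceeds the limit, return a value greater than the limit
--     if min_diff > limit:
--         return limit + 1
--     else:
--         return min_diff
-- ===== SOURCE B (Python) =====
-- def feline_fixes(typed, source, limit):
--     if typed == '' or source == '':
--         return abs(len(typed) - len(source))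
--     if limit < 0:
--         return limit + 1
--     d = abs(len(typed) - len(source))
--     m = sum(1 for a, b in zip(typed, source) if a != b)
--     if m == 0:
--         return d
--     return min(m + d, limit + 1)
-- ===== Notes on version B (the rewrite author's own statement) =====
-- stated objective: simpler
-- what changed: Replaced the per-character slice recursion with a single zip pass counting mismatches plus a closed-form min against limit+1.
import Mathlib
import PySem

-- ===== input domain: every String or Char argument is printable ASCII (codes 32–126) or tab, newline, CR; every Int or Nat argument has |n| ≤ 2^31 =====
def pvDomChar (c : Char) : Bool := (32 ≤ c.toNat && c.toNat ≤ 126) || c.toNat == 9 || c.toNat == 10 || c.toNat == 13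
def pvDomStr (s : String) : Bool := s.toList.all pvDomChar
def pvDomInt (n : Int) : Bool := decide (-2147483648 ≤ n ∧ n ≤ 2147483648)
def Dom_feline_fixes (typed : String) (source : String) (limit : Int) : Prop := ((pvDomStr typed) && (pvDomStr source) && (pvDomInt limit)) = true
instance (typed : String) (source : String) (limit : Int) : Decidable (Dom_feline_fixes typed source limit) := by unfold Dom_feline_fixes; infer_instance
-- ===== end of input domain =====

-- B replaces A's slice recursion by one mismatch-counting pass and a closed-form min (simpler, non-recursive).

-- ===== PORT A =====
-- A's recursion, transliterated on character lists (typed[1:] = tail, the two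
-- empty-string base cases are the first two pattern lines).
def felineFixesA : List Char → List Char → Int → Int
  | [], s, _ => ((0 : Int) - (s.length : Int)).natAbs
  | a :: t, [], _ => (((a :: t).length : Int) - 0).natAbs
  | a :: t, b :: s, limit =>
    if limit < 0 then limit + 1
    else if a = b then felineFixesA t s limit
    else
      let diff_substitute := 1 + felineFixesA t s (limit - 1)
      let min_diff := diff_substitute
      if min_diff > limit then limit + 1 else min_diff

def feline_fixes (typed : String) (source : String) (limit : Int) : Int :=
  felineFixesA typed.toList source.toList limit

-- ===== PORT B =====
def feline_fixes_alt (typed : String) (source : String) (limit : Int) : Int :=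
  let t := typed.toList
  let s := source.toList
  if t = [] ∨ s = [] then (((t.length : Int) - (s.length : Int)).natAbs : Int)
  else if limit < 0 then limit + 1
  else
    let d : Int := (((t.length : Int) - (s.length : Int)).natAbs : Int)
    let m : Nat := ((t.zip s).filter (fun p => p.1 ≠ p.2)).length
    if m = 0 then d else min ((m : Int) + d) (limit + 1)

-- ===== PRECONDITION & SPEC =====
def Spec_feline_fixes (typed : String) (source : String) (limit : Int) (out : Int) : Prop := out = feline_fixes_alt typed source limit
instance (typed : String) (source : String) (limit : Int) (out : Int) : Decidable (Spec_feline_fixes typed source limit out) := by unfold Spec_feline_fixes; infer_instance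

-- ===== CLAIM (what is proved, stated in full; the proofs are below) =====
def Claim_equal_feline_fixes : Prop := ∀ (typed : String) (source : String) (limit : Int), Dom_feline_fixes typed source limit → Spec_feline_fixes typed source limit (feline_fixes typed source limit)

-- ===== LEMMAS AND PROOFS =====

-- B's body, on lists (what feline_fixes_alt computes after toList).
def felineFixesB (t s : List Char) (limit : Int) : Int :=
  if t = [] ∨ s = [] then (((t.length : Int) - (s.length : Int)).natAbs : Int)
  else if limit < 0 then limit + 1
  else
    let d : Int := (((t.length : Int) - (s.length : Int)).natAbs : Int)
    let m : Nat := ((t.zip s).filter (fun p => p.1 ≠ p.2)).length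
    if m = 0 then d else min ((m : Int) + d) (limit + 1)

theorem alt_eq_felineFixesB (typed source : String) (limit : Int) :
    feline_fixes_alt typed source limit = felineFixesB typed.toList source.toList limit := rfl

theorem felineFixesA_eq_B (t : List Char) :
    ∀ (s : List Char) (limit : Int), felineFixesA t s limit = felineFixesB t s limit := by
  induction t with
  | nil =>
    intro s limit
    simp [felineFixesA, felineFixesB]
  | cons a t ih =>
    intro s limit
    cases s with
    | nil => simp [felineFixesA, felineFixesB]
    | cons b s =>
      by_cases hl : limit < 0
      · simp [felineFixesA, felineFixesB, hl]
      · by_cases hab : a = b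
        · rw [show felineFixesA (a :: t) (b :: s) limit = felineFixesA t s limit by
            simp [felineFixesA, hl, hab]]
          rw [ih s limit]
          -- peel the head off B's pass: equal heads change neither m nor d
          simp only [felineFixesB]
          have hd : (0:Int) ≤ |(t.length:Int) - (s.length:Int)| := abs_nonneg _
          by_cases ht : t = [] ∨ s = []
          · rcases ht with h | h <;> subst h <;>
              simp [List.zip, List.filter, hab] <;> omega
          · push Not at ht
            simp only [ht.1, ht.2, hl, List.zip, List.filter, hab, ne_eq, decide_not,
              List.zipWith_cons_cons, List.filter_cons, List.length_cons, Nat.cast_add]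
            simp
        · -- mismatch at the head
          rw [show felineFixesA (a :: t) (b :: s) limit =
              (if 1 + felineFixesA t s (limit - 1) > limit then limit + 1
               else 1 + felineFixesA t s (limit - 1)) by
            simp [felineFixesA, hl, hab]]
          rw [ih s (limit - 1)]
          simp only [felineFixesB]
          have hd : (0:Int) ≤ |(t.length:Int) - (s.length:Int)| := abs_nonneg _
          by_cases ht : t = [] ∨ s = []
          · rcases ht with h | h <;> subst h <;>
              simp [List.zip, List.filter, hab, hl] <;> omega
          · push Not at ht
            by_cases hl1 : limit - 1 < 0
            · simp [ht.1, ht.2, hl, hl1, List.zip, hab, ne_eq, decide_not]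
              omega
            · by_cases hm : ((t.zip s).filter (fun p => decide ¬(p.1 = p.2))).length = 0
              · simp only [List.zip, ne_eq, decide_not] at hm ⊢
                simp [ht.1, ht.2, hl, hl1, hm, hab]
                omega
              · simp only [List.zip, ne_eq, decide_not] at hm ⊢
                simp [ht.1, ht.2, hl, hl1, hm, hab]
                omega

-- ===== VERDICT (by name: the statement is the Claim_ definition above) =====
theorem feline_fixes_spec : Claim_equal_feline_fixes := by
  intro typed source limit _
  unfold Spec_feline_fixes
  rw [alt_eq_felineFixesB]
  exact felineFixesA_eq_B typed.toList source.toList limit
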